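-- pv_equiv track=rewrite | github.com/Kolapo-code/sb1-11c5s2 | src/santa_solver.py | calculate_sequence_score
-- ===== SOURCE A (Python) =====
-- from typing import List
--
-- def calculate_sequence_score(sequence: List[str]) -> float:
--     """
--     Calculate a simple language model score for a sequence of words.
--     This is a basic implementation - in practice you'd want to use
--     the actual Gemma 2 9B model for scoring.
--     """
--     # Simple bigram-based scoring
--     score = 0
--     for i in range(len(sequence) - 1):
--         word1, word2 = sequence[i], sequence[i + 1]
--         # Add basic scoring logic here
--         if word1.lower() in ['the', 'a', 'an'] and word2.lower() in ['and', 'or', 'but']: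
--             score -= 1  # Penalize article followed by conjunction
--         if word1.lower() in ['and', 'or', 'but'] and word2.lower() in ['the', 'a', 'an']:
--             score += 1  # Reward conjunction followed by article
--     return score
-- ===== SOURCE B (Python) =====
-- def calculate_sequence_score(sequence):
--     def cat(w):
--         lw = w.lower()
--         if lw in ('the', 'a', 'an'):
--             return 'A'
--         if lw in ('and', 'or', 'but'):
--             return 'C'
--         return 'O'
--     cats = ''.join(cat(w) for w in sequence)
--     return cats.count('CA') - cats.count('AC')
-- ===== Notes on version B (the rewrite author's own statement) =====
-- stated objective: alternative
-- what changed: B encodes the sequence as a category string ('A'/'C'/'O' per word, joined) and computes the score by substring search -- cats.count('CA') minus cats.count('AC') -- replacing A's index loop over adjacent pairs with two string-pattern counts (exact because a 2-letter pattern xy with x!=y can never overlap itself).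
import Mathlib
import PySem

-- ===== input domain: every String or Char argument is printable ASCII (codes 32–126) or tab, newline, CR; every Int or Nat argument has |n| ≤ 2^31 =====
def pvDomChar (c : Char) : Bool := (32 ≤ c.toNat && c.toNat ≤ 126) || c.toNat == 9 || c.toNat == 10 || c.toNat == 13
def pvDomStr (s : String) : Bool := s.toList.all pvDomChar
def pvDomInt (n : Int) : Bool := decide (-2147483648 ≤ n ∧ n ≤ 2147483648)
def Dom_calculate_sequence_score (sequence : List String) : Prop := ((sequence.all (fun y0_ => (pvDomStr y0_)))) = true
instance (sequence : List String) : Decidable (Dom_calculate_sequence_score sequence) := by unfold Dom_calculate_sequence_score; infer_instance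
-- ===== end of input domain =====

-- B replaces A's index loop over adjacent word pairs by encoding the sequence as a
-- category string and taking two non-overlapping substring counts (alternative, same cost).

-- ===== PORT A =====
-- indices i and i+1 are always in range inside the loop, so pyGetD with default "" is exact
def calculate_sequence_score (sequence : List String) : Int :=
  (PySem.List.pyRange 0 ((sequence.length : Int) - 1) 1).foldl (fun score i =>
    let word1 := PySem.List.pyGetD sequence i ""
    let word2 := PySem.List.pyGetD sequence (i + 1) ""
    let score := if ["the", "a", "an"].contains (PySem.Str.lower word1) &&
                    ["and", "or", "but"].contains (PySem.Str.lower word2) then score - 1 else score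
    let score := if ["and", "or", "but"].contains (PySem.Str.lower word1) &&
                    ["the", "a", "an"].contains (PySem.Str.lower word2) then score + 1 else score
    score) 0

-- ===== PORT B =====
def pvCat (w : String) : String :=
  let lw := PySem.Str.lower w
  if ["the", "a", "an"].contains lw then "A"
  else if ["and", "or", "but"].contains lw then "C"
  else "O"

def calculate_sequence_score_alt (sequence : List String) : Int :=
  let cats := PySem.Str.join "" (sequence.map pvCat)
  (PySem.Str.count cats "CA" : Int) - (PySem.Str.count cats "AC" : Int)

-- ===== PRECONDITION & SPEC =====
def Spec_calculate_sequence_score (sequence : List String) (out : Int) : Prop := out = calculate_sequence_score_alt sequence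
instance (sequence : List String) (out : Int) : Decidable (Spec_calculate_sequence_score sequence out) := by unfold Spec_calculate_sequence_score; infer_instance

-- ===== CLAIM (what is proved, stated in full; the proofs are below) =====
def Claim_equal_calculate_sequence_score : Prop := ∀ (sequence : List String), Dom_calculate_sequence_score sequence → Spec_calculate_sequence_score sequence (calculate_sequence_score sequence)

-- ===== LEMMAS AND PROOFS =====

-- the net contribution of one adjacent pair in A's loop body
def pvDelta (w1 w2 : String) : Int :=
  (if ["and", "or", "but"].contains (PySem.Str.lower w1) &&
      ["the", "a", "an"].contains (PySem.Str.lower w2) then 1 else 0)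
  - (if ["the", "a", "an"].contains (PySem.Str.lower w1) &&
       ["and", "or", "but"].contains (PySem.Str.lower w2) then 1 else 0)

lemma pvBody_eq (xs : List String) :
    (fun (score : Int) (i : Int) =>
        let word1 := PySem.List.pyGetD xs i ""
        let word2 := PySem.List.pyGetD xs (i + 1) ""
        let score := if ["the", "a", "an"].contains (PySem.Str.lower word1) &&
                        ["and", "or", "but"].contains (PySem.Str.lower word2) then score - 1 else score
        let score := if ["and", "or", "but"].contains (PySem.Str.lower word1) &&
                        ["the", "a", "an"].contains (PySem.Str.lower word2) then score + 1 else score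
        score)
    = fun (score : Int) (i : Int) =>
        score + pvDelta (PySem.List.pyGetD xs i "") (PySem.List.pyGetD xs (i + 1) "") := by
  funext score i
  simp only [pvDelta]
  split_ifs <;> ring

lemma pvPairs_map (g : String → String → Int) (xs : List String) :
    (List.range (xs.length - 1)).map (fun k => g (xs.getD k "") (xs.getD (k + 1) ""))
      = (xs.zip xs.tail).map (fun p => g p.1 p.2) := by
  induction xs with
  | nil => simp
  | cons x t ih =>
    cases t with
    | nil => simp
    | cons y ys =>
      have hlen : (x :: y :: ys : List String).length - 1 = ((y :: ys : List String).length - 1) + 1 := by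
        simp
      rw [hlen, List.range_succ_eq_map]
      simp only [List.map_cons, List.map_map]
      rw [show (x :: y :: ys : List String).zip (x :: y :: ys : List String).tail
            = (x, y) :: ((y :: ys : List String).zip (y :: ys : List String).tail) by simp]
      simp only [List.map_cons]
      refine List.cons_eq_cons.mpr ⟨by simp [List.getD], ?_⟩
      rw [← ih]
      apply List.map_congr_left
      intro k _
      simp [List.getD, Function.comp]

lemma pvSum_sub_counts {α : Type} (P Q : α → Bool) (l : List α) :
    (l.map (fun x => ((if P x then 1 else 0) - (if Q x then 1 else 0) : Int))).sum
      = (l.countP P : Int) - (l.countP Q : Int) := by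
  induction l with
  | nil => simp
  | cons a l ih =>
    simp only [List.map_cons, List.sum_cons, List.countP_cons, ih]
    split_ifs <;> push_cast <;> ring

-- A's score is the signed sum of pair contributions over adjacent pairs
lemma pvA_eq_sum (xs : List String) :
    calculate_sequence_score xs
      = ((xs.zip xs.tail).map (fun p => pvDelta p.1 p.2)).sum := by
  unfold calculate_sequence_score
  rw [pvBody_eq xs, PySem.List.foldl_add]
  cases xs with
  | nil => simp [PySem.List.pyRange]
  | cons x t =>
    have hb : ((x :: t : List String).length : Int) - 1 = (t.length : Nat) := by
      push_cast [List.length_cons]; ring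
    rw [hb, PySem.List.pyRange_zero_natCast]
    have hmap : (List.map (fun k : Nat => (k : Int)) (List.range t.length)).map
          (fun i => pvDelta (PySem.List.pyGetD (x :: t) i "")
              (PySem.List.pyGetD (x :: t) (i + 1) ""))
        = (List.range ((x :: t : List String).length - 1)).map
            (fun k => pvDelta ((x :: t).getD k "") ((x :: t).getD (k + 1) "")) := by
      rw [List.map_map]
      simp only [List.length_cons, Nat.add_sub_cancel]
      apply List.map_congr_left
      intro k _
      simp only [Function.comp_apply]
      rw [show ((k : Int) + 1) = ((k + 1 : Nat) : Int) by push_cast; ring]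
      rw [PySem.List.pyGetD_natCast, PySem.List.pyGetD_natCast]
    rw [hmap, pvPairs_map (fun w1 w2 => pvDelta w1 w2)]
    simp

-- the category character of a word (B's cats string is the list of these)
def pvCatC (w : String) : Char :=
  if ["the", "a", "an"].contains (PySem.Str.lower w) then 'A'
  else if ["and", "or", "but"].contains (PySem.Str.lower w) then 'C'
  else 'O'

lemma pvCat_toList (w : String) : (pvCat w).toList = [pvCatC w] := by
  dsimp only [pvCat, pvCatC]
  split_ifs <;> rfl

lemma pvCatC_eq_A (w : String) :
    (pvCatC w == 'A') = ["the", "a", "an"].contains (PySem.Str.lower w) := by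
  unfold pvCatC
  split_ifs with h1 h2 <;> simp_all

lemma pvCatC_eq_C (w : String) :
    (pvCatC w == 'C') = ["and", "or", "but"].contains (PySem.Str.lower w) := by
  unfold pvCatC
  split_ifs with h1 h2 <;> simp_all
  rcases h1 with h | h | h <;> simp [h]

-- Python's str.count for a two-letter pattern xy with x ≠ y counts exactly the
-- adjacent pairs (x, y): such a pattern can never overlap itself.
lemma pvGo_nil (sub : List Char) (fuel : Nat) (acc : Nat) :
    PySem.Chars.count.go sub fuel [] acc = acc := by
  cases fuel <;> simp [PySem.Chars.count.go]

lemma pvCount_go_pair (x y : Char) (hxy : x ≠ y) :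
    ∀ (fuel : Nat) (s : List Char) (acc : Nat), s.length ≤ fuel →
      PySem.Chars.count.go [x, y] fuel s acc
        = acc + (s.zip s.tail).countP (fun p => p.1 == x && p.2 == y) := by
  intro fuel
  induction fuel with
  | zero =>
    intro s acc h
    have hs : s = [] := List.eq_nil_of_length_eq_zero (Nat.le_zero.mp h)
    subst hs
    simp [PySem.Chars.count.go]
  | succ n ih =>
    intro s acc h
    match s with
    | [] => simp [PySem.Chars.count.go]
    | [a] =>
      have hpre : ([x, y] : List Char).isPrefixOf [a] = false := by
        simp [List.isPrefixOf]
      simp [PySem.Chars.count.go, hpre, pvGo_nil]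
    | a :: b :: t =>
      by_cases hab : x = a ∧ y = b
      · -- match: consume both characters; the skipped pair (b, ·) cannot match since b = y ≠ x
        obtain ⟨h1, h2⟩ := hab
        subst h1; subst h2
        have hpre : ([x, y] : List Char).isPrefixOf (x :: y :: t) = true := by
          simp [List.isPrefixOf]
        have hlen : t.length ≤ n := by simp at h; omega
        have hrec := ih t (acc + 1) hlen
        simp only [PySem.Chars.count.go, hpre]
        rw [if_pos trivial]
        rw [show List.drop ([x, y] : List Char).length (x :: y :: t) = t from rfl]
        rw [hrec]
        have hbx : (y == x) = false := beq_eq_false_iff_ne.mpr (Ne.symm hxy)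
        have hbt : ((y :: t).zip t).countP (fun p => p.1 == x && p.2 == y)
            = (t.zip t.tail).countP (fun p => p.1 == x && p.2 == y) := by
          cases t with
          | nil => simp
          | cons c t' => simp [hbx]
        simp [hbt]
        omega
      · -- no match at this position: step to the tail
        have hpre : ([x, y] : List Char).isPrefixOf (a :: b :: t) = false := by
          simp only [List.isPrefixOf, Bool.and_true]
          by_contra hc
          simp only [Bool.not_eq_false, Bool.and_eq_true, beq_iff_eq] at hc
          exact hab ⟨hc.1, hc.2⟩
        have hlen : (b :: t).length ≤ n := by simp at h ⊢; omega
        have hrec := ih (b :: t) acc hlen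
        simp only [PySem.Chars.count.go, hpre]
        rw [if_neg (by decide)]
        rw [hrec]
        have hc : (a == x && b == y) = false := by
          by_contra hc'
          simp only [Bool.not_eq_false, Bool.and_eq_true, beq_iff_eq] at hc'
          exact hab ⟨hc'.1.symm, hc'.2.symm⟩
        simp [hc]

lemma pvCount_pair (x y : Char) (hxy : x ≠ y) (s : List Char) :
    PySem.Chars.count s [x, y]
      = (s.zip s.tail).countP (fun p => p.1 == x && p.2 == y) := by
  unfold PySem.Chars.count
  rw [if_neg (by simp)]
  simpa using pvCount_go_pair x y hxy s.length s 0 le_rfl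

-- B's cats string is the per-word category characters
lemma pvCats_toList (xs : List String) :
    (PySem.Str.join "" (xs.map pvCat)).toList = xs.map pvCatC := by
  rw [PySem.Str.toList_join]
  have : (xs.map pvCat).map String.toList = (xs.map pvCatC).map (fun c => [c]) := by
    simp [List.map_map, Function.comp, pvCat_toList]
  rw [this]
  simpa using PySem.Chars.join_nil_singletons (xs.map pvCatC)

lemma pvB_eq_counts (xs : List String) :
    calculate_sequence_score_alt xs
      = (((xs.zip xs.tail).countP
            (fun p => ["and", "or", "but"].contains (PySem.Str.lower p.1) &&
                      ["the", "a", "an"].contains (PySem.Str.lower p.2)) : Nat) : Int)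
        - (((xs.zip xs.tail).countP
            (fun p => ["the", "a", "an"].contains (PySem.Str.lower p.1) &&
                      ["and", "or", "but"].contains (PySem.Str.lower p.2)) : Nat) : Int) := by
  unfold calculate_sequence_score_alt
  simp only [PySem.Str.count]
  rw [show ("CA" : String).toList = ['C', 'A'] from rfl,
      show ("AC" : String).toList = ['A', 'C'] from rfl,
      pvCats_toList]
  rw [pvCount_pair 'C' 'A' (by decide), pvCount_pair 'A' 'C' (by decide)]
  rw [show (xs.map pvCatC).tail = xs.tail.map pvCatC by cases xs <;> simp]
  rw [List.zip_map, List.countP_map, List.countP_map]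
  congr 2
  · congr 1
    funext p
    simp [Function.comp, Prod.map, pvCatC_eq_A, pvCatC_eq_C]
  · congr 1
    funext p
    simp [Function.comp, Prod.map, pvCatC_eq_A, pvCatC_eq_C]

-- ===== VERDICT (by name: the statement is the Claim_ definition above) =====
theorem calculate_sequence_score_spec : Claim_equal_calculate_sequence_score := by
  intro xs _
  unfold Spec_calculate_sequence_score
  rw [pvA_eq_sum, pvB_eq_counts]
  have := pvSum_sub_counts
    (fun p : String × String => ["and", "or", "but"].contains (PySem.Str.lower p.1) &&
        ["the", "a", "an"].contains (PySem.Str.lower p.2))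
    (fun p : String × String => ["the", "a", "an"].contains (PySem.Str.lower p.1) &&
        ["and", "or", "but"].contains (PySem.Str.lower p.2))
    (xs.zip xs.tail)
  rw [← this]
  rfl
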